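-- pv_equiv track=rewrite | github.com/J0yKey04/homework | expi2.py | boom
-- ===== SOURCE A (Python) =====
-- def boom(n):
--     l = 0
--     for i in range(n, 0, -1):
--
--         l += 1
--
--         if n // 3:
--             n = n // 3
--         elif n // 2:
--             n = n // 2
--         else:
--             n -= 1
--         if n <= 0:
--             return l + 1
-- ===== SOURCE B (Python) =====
-- def boom(n):
--     if n <= 0:
--         return None
--     # grow powers of 3 upward by multiplication (no division anywhere):
--     # p ends as the largest power of 3 with p <= n, k its exponent
--     p, k = 1, 0
--     while 3 * p <= n:
--         p *= 3
--         k += 1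
--     return k + 2 + (1 if 2 * p <= n else 0)
-- ===== Notes on version B (the rewrite author's own statement) =====
-- stated objective: alternative
-- what changed: Instead of simulating A's reduction chain (repeated floor-divisions of n with a 3-way branch), B never divides at all: it grows powers of 3 upward by multiplication to find the largest 3^k <= n, and gets the answer in closed form as k + 2 plus 1 when 2*3^k <= n.
-- outside the precondition, e.g. on boom(0): A returns None, B returns None
import Mathlib
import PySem

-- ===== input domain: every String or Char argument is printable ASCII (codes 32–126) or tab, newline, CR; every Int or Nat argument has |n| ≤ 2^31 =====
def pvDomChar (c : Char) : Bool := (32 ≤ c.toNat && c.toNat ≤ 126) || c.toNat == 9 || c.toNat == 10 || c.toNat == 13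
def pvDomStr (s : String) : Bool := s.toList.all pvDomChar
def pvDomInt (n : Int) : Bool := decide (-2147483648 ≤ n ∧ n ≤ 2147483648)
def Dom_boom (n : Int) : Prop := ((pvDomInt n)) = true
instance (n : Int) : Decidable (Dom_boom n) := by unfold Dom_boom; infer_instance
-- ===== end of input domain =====

-- B never divides: it finds the largest power 3^k ≤ n by multiplying upward and
-- returns k + 2 (+1 when 2·3^k ≤ n) in closed form, instead of A's step-by-step
-- reduction of n with a 3-way branch; n ≤ 0 (where the Python A returns None,
-- not an int) is excluded by Pre_boom.


-- ===== PORT A =====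
-- the for-loop over range(n, 0, -1) with early return; none = loop exhausted (Python returns None)
def boomLoop : List Int → Int → Int → Option Int
  | [], _, _ => none
  | _ :: rest, n, l =>
    let l' := l + 1
    let n' := if PySem.Int.floordiv n 3 ≠ 0 then PySem.Int.floordiv n 3
              else if PySem.Int.floordiv n 2 ≠ 0 then PySem.Int.floordiv n 2
              else n - 1
    if n' ≤ 0 then some (l' + 1) else boomLoop rest n' l'

def boom (n : Int) : Int :=
  (boomLoop (PySem.List.pyRange n 0 (-1)) n 0).getD 0  -- getD 0: Python yields None there; excluded by Pre_boom

-- ===== PORT B =====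
-- the `while 3*p <= n: p *= 3; k += 1` loop; the `1 ≤ p` conjunct is a totality
-- guard only (in B, p starts at 1 and only triples, so it always holds)
def powLoop (n p k : Int) : Int × Int :=
  if h : 1 ≤ p ∧ 3 * p ≤ n then powLoop n (3 * p) (k + 1) else (p, k)
termination_by (n - p).toNat
decreasing_by omega

def boom_alt (n : Int) : Int :=
  if n ≤ 0 then 0  -- Python returns None there; excluded by Pre_boom
  else
    let pk := powLoop n 1 0
    pk.2 + 2 + (if 2 * pk.1 ≤ n then 1 else 0)

-- ===== PRECONDITION & SPEC =====
-- Pre_boom excludes exactly n ≤ 0, where the Python A exhausts an empty range and returns None (not an int)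
def Pre_boom (n : Int) : Prop := 1 ≤ n
instance (n : Int) : Decidable (Pre_boom n) := by unfold Pre_boom; infer_instance
def pvWitness_boom : Int := 7
def Spec_boom (n : Int) (out : Int) : Prop := out = boom_alt n
instance (n : Int) (out : Int) : Decidable (Spec_boom n out) := by unfold Spec_boom; infer_instance

-- ===== CLAIM (what is proved, stated in full; the proofs are below) =====
def Claim_equal_boom : Prop := ∀ (n : Int), Dom_boom n → Pre_boom n → Spec_boom n (boom n)

-- ===== LEMMAS AND PROOFS =====
-- the power loop on n, one step in, runs in lockstep with the power loop on n // 3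
theorem powLoop_shift (n : Int) (hn : 3 ≤ n) :
    ∀ p k, 1 ≤ p →
      powLoop n (3 * p) (k + 1) =
        ((powLoop (PySem.Int.floordiv n 3) p k).1 * 3,
         (powLoop (PySem.Int.floordiv n 3) p k).2 + 1) := by
  have hm : PySem.Int.floordiv n 3 = n / 3 :=
    PySem.Int.floordiv_eq_ediv_of_pos (by omega)
  intro p k hp
  induction hfuel : ((n / 3) - p).toNat using Nat.strong_induction_on generalizing p k with
  | _ fuel ih =>
  rw [hm]
  by_cases hstep : 3 * p ≤ n / 3
  · have h9 : 3 * (3 * p) ≤ n := by omega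
    rw [powLoop, dif_pos ⟨by omega, h9⟩]
    conv_rhs => rw [powLoop, dif_pos ⟨hp, hstep⟩]
    rw [← hm, ih ((n / 3) - 3 * p).toNat (by omega) (3 * p) (k + 1) (by omega) rfl, hm]
  · have h9 : ¬ 3 * (3 * p) ≤ n := by omega
    rw [powLoop, dif_neg (by omega)]
    conv_rhs => rw [powLoop, dif_neg (by omega)]
    simp [mul_comm]

theorem boom_alt_step (n : Int) (h : 3 ≤ n) :
    boom_alt n = 1 + boom_alt (PySem.Int.floordiv n 3) := by
  have hm : PySem.Int.floordiv n 3 = n / 3 :=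
    PySem.Int.floordiv_eq_ediv_of_pos (by omega)
  have hm1 : 1 ≤ PySem.Int.floordiv n 3 := by rw [hm]; omega
  unfold boom_alt
  rw [if_neg (by omega), if_neg (by omega)]
  conv_lhs => rw [powLoop, dif_pos ⟨by omega, by omega⟩]
  rw [show (3 : Int) * 1 = 3 * 1 from rfl, show (0 : Int) + 1 = 0 + 1 from rfl,
      powLoop_shift n h 1 0 (by omega)]
  have hres : (2 * ((powLoop (PySem.Int.floordiv n 3) 1 0).1 * 3) ≤ n) ↔
      (2 * (powLoop (PySem.Int.floordiv n 3) 1 0).1 ≤ PySem.Int.floordiv n 3) := by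
    rw [hm]; omega
  simp only [hres]
  split_ifs <;> ring

theorem boomLoop_eq (xs : List Int) (n l : Int) (h1 : 1 ≤ n) (hlen : n ≤ (xs.length : Int)) :
    boomLoop xs n l = some (l + boom_alt n) := by
  induction xs generalizing n l with
  | nil => simp at hlen; omega
  | cons x rest ih =>
    simp only [List.length_cons] at hlen
    push_cast at hlen
    have hba1 : boom_alt 1 = 2 := by
      unfold boom_alt
      rw [if_neg (by omega), powLoop, dif_neg (by omega)]
      norm_num
    rcases lt_or_ge n 3 with hn3 | hn3
    · interval_cases n
      · -- n = 1
        rw [boomLoop]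
        norm_num [PySem.Int.floordiv, Int.fdiv, hba1]
        omega
      · -- n = 2
        rw [boomLoop]
        norm_num [PySem.Int.floordiv, Int.fdiv]
        rw [ih 1 (l + 1) (by omega) (by omega), hba1]
        have hba2 : boom_alt 2 = 3 := by
          unfold boom_alt
          rw [if_neg (by omega), powLoop, dif_neg (by omega)]
          norm_num
        rw [hba2]
        simp only [Option.some.injEq]; omega
    · -- n ≥ 3
      have hq : 1 ≤ PySem.Int.floordiv n 3 := by
        rw [PySem.Int.floordiv_eq_ediv_of_pos (by omega)]; omega
      have hlt : PySem.Int.floordiv n 3 < n := by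
        rw [PySem.Int.floordiv_eq_ediv_of_pos (by omega)]; omega
      rw [boomLoop]
      simp only [if_neg (show ¬ PySem.Int.floordiv n 3 = 0 by omega), ite_not]
      rw [if_neg (by omega)]
      rw [ih (PySem.Int.floordiv n 3) (l + 1) hq (by omega)]
      rw [boom_alt_step n hn3]
      ring_nf

theorem pyRange_len (n : Int) (h : 1 ≤ n) :
    ((PySem.List.pyRange n 0 (-1)).length : Int) = n := by
  simp [PySem.List.pyRange]
  omega

-- ===== VERDICT (by name: the statement is the Claim_ definition above) =====
theorem boom_spec : Claim_equal_boom := by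
  intro n _ hpre
  unfold Spec_boom boom
  rw [boomLoop_eq _ n 0 hpre (by rw [pyRange_len n hpre])]
  simp
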